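-- pv_equiv track=rewrite | github.com/ernane/mecai | MAI5001/6 - Lista 1 - Exercício 7: Bomberman/solucao.py | explode_bombs
-- ===== SOURCE A (Python) =====
-- from copy import deepcopy
--
-- def explode_bombs(grid, bombs):
--     new_grid = deepcopy(grid)
--     for bomb in bombs:
--         i, j = bomb
--         new_grid[i][j] = "."
--         for di, dj in [(0, 1), (0, -1), (1, 0), (-1, 0)]:
--             ni, nj = i + di, j + dj
--             if 0 <= ni < len(grid) and 0 <= nj < len(grid[0]) and grid[ni][nj] != "0":
--                 new_grid[ni][nj] = "."
--     return new_grid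
-- ===== SOURCE B (Python) =====
-- from copy import deepcopy
--
-- def explode_bombs(grid, bombs):
--     new_grid = deepcopy(grid)
--     bomb_set = set(bombs)
--     for i, j in bombs:
--         new_grid[i][j] = "."
--     for r in range(len(grid)):
--         row = grid[r]
--         for c in range(len(row)):
--             if row[c] != "0" and (
--                 (r + 1, c) in bomb_set or (r - 1, c) in bomb_set
--                 or (r, c + 1) in bomb_set or (r, c - 1) in bomb_set
--             ):
--                 new_grid[r][c] = "."
--     return new_grid
-- ===== Notes on version B (the rewrite author's own statement) =====
-- stated objective: alternative
-- what changed: Replaces the scatter pass (each bomb writes '.' into its four neighbors) by a set of bomb coordinates plus a gather pass over every cell that clears a cell when one of its four orthogonal neighbors is in the bomb set; the raw per-bomb cell assignment is kept.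
-- outside the precondition, e.g. on explode_bombs([['1'], ['1', '1']], [(1, 0)]): A returns [['.'], ['.', '1']], B returns [['.'], ['.', '.']]; on explode_bombs([['1'], ['1', '1']], [(0, 0)]): A returns [['.'], ['.', '1']], B returns [['.'], ['.', '1']]
import Mathlib
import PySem

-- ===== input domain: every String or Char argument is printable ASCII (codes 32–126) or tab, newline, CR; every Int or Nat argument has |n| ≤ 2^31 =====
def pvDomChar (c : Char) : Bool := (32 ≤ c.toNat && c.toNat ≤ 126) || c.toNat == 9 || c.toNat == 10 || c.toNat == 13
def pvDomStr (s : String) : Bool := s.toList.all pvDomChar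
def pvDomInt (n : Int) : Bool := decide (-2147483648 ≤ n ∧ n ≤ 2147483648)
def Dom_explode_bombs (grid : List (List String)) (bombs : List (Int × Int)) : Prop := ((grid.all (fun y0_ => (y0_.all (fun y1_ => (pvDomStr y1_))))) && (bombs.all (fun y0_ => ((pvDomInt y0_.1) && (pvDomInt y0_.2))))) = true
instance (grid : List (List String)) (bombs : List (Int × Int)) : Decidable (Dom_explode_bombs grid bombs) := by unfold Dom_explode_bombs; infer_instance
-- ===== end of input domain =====

-- B replaces A's scatter pass (each bomb writes '.' into its neighbors) by a bomb-coordinate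
-- set plus a gather pass over all cells (alternative decomposition, same cost).

-- shared helper: the Python statement `new_grid[i][j] = "."` (read row i, set column j, write row back)
def pvUpd (g : List (List String)) (i j : Int) : List (List String) :=
  PySem.List.pySetD g i (PySem.List.pySetD (PySem.List.pyGetD g i []) j ".")

-- ===== PORT A =====
-- the neighbor guard `0 <= ni < len(grid) and 0 <= nj < len(grid[0]) and grid[ni][nj] != "0"`
def pvGuardA (grid : List (List String)) (ni nj : Int) : Bool :=
  decide (0 ≤ ni) && decide (ni < (grid.length : Int)) && decide (0 ≤ nj) &&
    decide (nj < ((PySem.List.pyGetD grid 0 []).length : Int)) &&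
    (PySem.List.pyGetD (PySem.List.pyGetD grid ni []) nj "" != "0")

def explode_bombs (grid : List (List String)) (bombs : List (Int × Int)) : List (List String) :=
  bombs.foldl (fun ng b =>
    let i := b.1
    let j := b.2
    let ng1 := pvUpd ng i j
    ([((0:Int),(1:Int)), (0,-1), (1,0), (-1,0)]).foldl (fun ng2 d =>
      if pvGuardA grid (i + d.1) (j + d.2) then pvUpd ng2 (i + d.1) (j + d.2) else ng2) ng1) grid

-- ===== PORT B =====
-- the gather guard: cell not "0" and some orthogonal neighbor is in the bomb set
def pvGuardB (bombSet : PySem.Set (Int × Int)) (row : List String) (r c : Nat) : Bool :=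
  (row.getD c "" != "0") &&
    (PySem.Set.contains bombSet ((r:Int)+1, (c:Int)) ||
     PySem.Set.contains bombSet ((r:Int)-1, (c:Int)) ||
     PySem.Set.contains bombSet ((r:Int), (c:Int)+1) ||
     PySem.Set.contains bombSet ((r:Int), (c:Int)-1))

def explode_bombs_alt (grid : List (List String)) (bombs : List (Int × Int)) : List (List String) :=
  let bombSet : PySem.Set (Int × Int) := PySem.Set.ofList bombs
  let ng0 := bombs.foldl (fun ng p => pvUpd ng p.1 p.2) grid
  (List.range grid.length).foldl (fun ng r =>
    let row := grid.getD r []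
    (List.range row.length).foldl (fun ng2 c =>
      if pvGuardB bombSet row r c then pvUpd ng2 (r:Int) (c:Int) else ng2) ng) ng0

-- ===== PRECONDITION & SPEC =====
-- Pre_ admits every grid when bombs is empty; with bombs present it excludes ragged grids
-- (A bounds neighbor columns by len(grid[0]) — an accident of representation on non-rectangular
-- input, where A may also raise IndexError) and bombs whose raw indices make
-- `new_grid[i][j] = "."` raise IndexError.
def Pre_explode_bombs (grid : List (List String)) (bombs : List (Int × Int)) : Prop :=
  bombs = [] ∨
  ((∀ row ∈ grid, row.length = (grid.headD []).length) ∧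
  ∀ b ∈ bombs, -(grid.length : Int) ≤ b.1 ∧ b.1 < (grid.length : Int) ∧
    -(((grid.headD []).length : Int)) ≤ b.2 ∧ b.2 < ((grid.headD []).length : Int))

instance (grid : List (List String)) (bombs : List (Int × Int)) : Decidable (Pre_explode_bombs grid bombs) := by
  unfold Pre_explode_bombs; infer_instance

def pvWitness_explode_bombs : List (List String) × (List (Int × Int)) :=
  ([["1","0"],["1","1"]], [((0:Int),(0:Int)), (-1,-1)])

def Spec_explode_bombs (grid : List (List String)) (bombs : List (Int × Int)) (out : List (List String)) : Prop := out = explode_bombs_alt grid bombs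
instance (grid : List (List String)) (bombs : List (Int × Int)) (out : List (List String)) : Decidable (Spec_explode_bombs grid bombs out) := by unfold Spec_explode_bombs; infer_instance

-- ===== CLAIM (what is proved, stated in full; the proofs are below) =====
def Claim_equal_explode_bombs : Prop := ∀ (grid : List (List String)) (bombs : List (Int × Int)), Dom_explode_bombs grid bombs → Pre_explode_bombs grid bombs → Spec_explode_bombs grid bombs (explode_bombs grid bombs)

-- ===== LEMMAS AND PROOFS =====

-- cell accessor and Python index wrap
def cellAt (g : List (List String)) (r c : Nat) : String := (g.getD r []).getD c ""
def wrapIdx (n : Nat) (i : Int) : Nat := if 0 ≤ i then i.toNat else (i + n).toNat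
def InRangeP (n : Nat) (i : Int) : Prop := -(n:Int) ≤ i ∧ i < (n:Int)
def Shaped (rows cols : Nat) (g : List (List String)) : Prop :=
  g.length = rows ∧ ∀ row ∈ g, row.length = cols
def applyOps (g : List (List String)) (ops : List (Int × Int)) : List (List String) :=
  ops.foldl (fun g p => pvUpd g p.1 p.2) g

lemma pyIdx_some (n : Nat) (i : Int) (h : InRangeP n i) :
    PySem.List.pyIdx? n i = some (wrapIdx n i) := by
  obtain ⟨h1, h2⟩ := h
  simp only [PySem.List.pyIdx?, wrapIdx]
  split_ifs with h3 <;> simp <;> omega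

lemma wrapIdx_lt (n : Nat) (i : Int) (h : InRangeP n i) : wrapIdx n i < n := by
  obtain ⟨h1, h2⟩ := h; simp only [wrapIdx]; split_ifs <;> omega


lemma pvUpd_eq_set (g : List (List String)) (i j : Int) (hi : InRangeP g.length i)
    (hj : InRangeP (g.getD (wrapIdx g.length i) []).length j) :
    pvUpd g i j = g.set (wrapIdx g.length i)
      ((g.getD (wrapIdx g.length i) []).set (wrapIdx (g.getD (wrapIdx g.length i) []).length j) ".") := by
  have hki := pyIdx_some g.length i hi
  have hrow : PySem.List.pyGetD g i [] = g.getD (wrapIdx g.length i) [] := by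
    simp [PySem.List.pyGetD, PySem.List.pyGet?, hki, List.getD_eq_getElem?_getD]
  have hkj := pyIdx_some _ j hj
  simp only [pvUpd, PySem.List.pySetD, PySem.List.pySet?, hki, hrow, hkj, Option.map_some,
    Option.getD_some]

lemma getD_mem_of_lt (g : List (List String)) (k : Nat) (hk : k < g.length) :
    g.getD k [] ∈ g := by
  rw [List.getD_eq_getElem?_getD, List.getElem?_eq_getElem hk]
  exact List.getElem_mem hk

lemma pvUpd_shape (rows cols : Nat) (g : List (List String)) (hs : Shaped rows cols g)
    (i j : Int) (hi : InRangeP rows i) (hj : InRangeP cols j) :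
    Shaped rows cols (pvUpd g i j) := by
  obtain ⟨hlen, hrect⟩ := hs
  subst hlen
  have hlt := wrapIdx_lt g.length i hi
  have hrl : (g.getD (wrapIdx g.length i) []).length = cols :=
    hrect _ (getD_mem_of_lt g _ hlt)
  rw [pvUpd_eq_set g i j hi (by rw [hrl]; exact hj)]
  refine ⟨by simp, ?_⟩
  intro row hrow
  rcases List.mem_or_eq_of_mem_set hrow with h | h
  · exact hrect _ h
  · subst h; rw [List.length_set]; exact hrl

lemma pvUpd_cell (rows cols : Nat) (g : List (List String)) (hs : Shaped rows cols g)
    (i j : Int) (hi : InRangeP rows i) (hj : InRangeP cols j) (r c : Nat) :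
    cellAt (pvUpd g i j) r c =
      if wrapIdx rows i = r ∧ wrapIdx cols j = c then "." else cellAt g r c := by
  obtain ⟨hlen, hrect⟩ := hs
  subst hlen
  have hlt := wrapIdx_lt g.length i hi
  have hrl : (g.getD (wrapIdx g.length i) []).length = cols :=
    hrect _ (getD_mem_of_lt g _ hlt)
  have hjlt : wrapIdx cols j < cols := wrapIdx_lt cols j hj
  rw [pvUpd_eq_set g i j hi (by rw [hrl]; exact hj), hrl]
  simp only [cellAt, List.getD_eq_getElem?_getD]
  have hrl' : (g[wrapIdx g.length i]?.getD []).length = cols := by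
    rw [← List.getD_eq_getElem?_getD]; exact hrl
  by_cases hr : wrapIdx g.length i = r
  · subst hr
    rw [List.getElem?_set_self hlt, Option.getD_some]
    by_cases hc : wrapIdx cols j = c
    · subst hc
      rw [List.getElem?_set_self (by rw [hrl']; exact hjlt)]
      simp
    · rw [List.getElem?_set_ne hc]
      simp [hc, List.getD_eq_getElem?_getD]
  · rw [List.getElem?_set_ne hr]
    simp [hr, List.getD_eq_getElem?_getD]

lemma applyOps_shape (rows cols : Nat) (ops : List (Int × Int)) :
    ∀ g : List (List String), Shaped rows cols g →
    (∀ p ∈ ops, InRangeP rows p.1 ∧ InRangeP cols p.2) →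
    Shaped rows cols (applyOps g ops) := by
  induction ops with
  | nil => intro g hs _; exact hs
  | cons p ps ih =>
    intro g hs hops
    have hp := hops p (by simp)
    exact ih _ (pvUpd_shape rows cols g hs p.1 p.2 hp.1 hp.2)
      (fun q hq => hops q (by simp [hq]))

lemma applyOps_cell (rows cols : Nat) (ops : List (Int × Int)) :
    ∀ g : List (List String), Shaped rows cols g →
    (∀ p ∈ ops, InRangeP rows p.1 ∧ InRangeP cols p.2) →
    ∀ r c : Nat, cellAt (applyOps g ops) r c =
      if ∃ p ∈ ops, wrapIdx rows p.1 = r ∧ wrapIdx cols p.2 = c then "." else cellAt g r c := by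
  induction ops with
  | nil => intro g hs _ r c; simp [applyOps]
  | cons p ps ih =>
    intro g hs hops r c
    have hp := hops p (by simp)
    have hstep : applyOps g (p :: ps) = applyOps (pvUpd g p.1 p.2) ps := rfl
    rw [hstep, ih _ (pvUpd_shape rows cols g hs p.1 p.2 hp.1 hp.2)
      (fun q hq => hops q (by simp [hq])) r c,
      pvUpd_cell rows cols g hs p.1 p.2 hp.1 hp.2 r c]
    by_cases h1 : ∃ q ∈ ps, wrapIdx rows q.1 = r ∧ wrapIdx cols q.2 = c
    · simp [h1]
    · by_cases h2 : wrapIdx rows p.1 = r ∧ wrapIdx cols p.2 = c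
      · simp [h1, h2]
      · have : ¬ ∃ q ∈ p :: ps, wrapIdx rows q.1 = r ∧ wrapIdx cols q.2 = c := by
          simp only [List.mem_cons]
          rintro ⟨q, (rfl | hq), hqe⟩
          exacts [h2 hqe, h1 ⟨q, hq, hqe⟩]
        simp [h1, h2, this]



lemma applyOps_append (g : List (List String)) (l1 l2 : List (Int × Int)) :
    applyOps g (l1 ++ l2) = applyOps (applyOps g l1) l2 := List.foldl_append

lemma foldl_guard_eq {α : Type} (P : α → Bool) (f : α → Int × Int) :
    ∀ (xs : List α) (g : List (List String)),
    xs.foldl (fun ng x => if P x then pvUpd ng (f x).1 (f x).2 else ng) g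
      = applyOps g (xs.filterMap (fun x => if P x then some (f x) else none)) := by
  intro xs
  induction xs with
  | nil => intro g; rfl
  | cons x xs ih =>
    intro g
    rw [List.foldl_cons, List.filterMap_cons]
    by_cases h : P x
    · simp only [h, if_pos]
      rw [ih]
      rfl
    · simp only [h, Bool.false_eq_true, if_neg, not_false_eq_true]
      exact ih g

def pvNeighOps (grid : List (List String)) (b : Int × Int) : List (Int × Int) :=
  [((0:Int),(1:Int)), (0,-1), (1,0), (-1,0)].filterMap (fun d =>
    if pvGuardA grid (b.1 + d.1) (b.2 + d.2) then some (b.1 + d.1, b.2 + d.2) else none)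

def pvOpsA (grid : List (List String)) (bombs : List (Int × Int)) : List (Int × Int) :=
  bombs.flatMap (fun b => (b.1, b.2) :: pvNeighOps grid b)

def pvGatherOps (grid : List (List String)) (bombSet : PySem.Set (Int × Int)) : List (Int × Int) :=
  (List.range grid.length).flatMap (fun r =>
    (List.range (grid.getD r []).length).filterMap (fun c =>
      if pvGuardB bombSet (grid.getD r []) r c then some ((r:Int), (c:Int)) else none))

lemma A_fold (grid : List (List String)) (bombs : List (Int × Int)) :
    ∀ g : List (List String),
    bombs.foldl (fun ng b =>
      let i := b.1
      let j := b.2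
      let ng1 := pvUpd ng i j
      ([((0:Int),(1:Int)), (0,-1), (1,0), (-1,0)]).foldl (fun ng2 d =>
        if pvGuardA grid (i + d.1) (j + d.2) then pvUpd ng2 (i + d.1) (j + d.2) else ng2) ng1) g
      = applyOps g (pvOpsA grid bombs) := by
  induction bombs with
  | nil => intro g; rfl
  | cons b bs ih =>
    intro g
    rw [List.foldl_cons, ih,
      show pvOpsA grid (b :: bs) = ((b.1, b.2) :: pvNeighOps grid b) ++ pvOpsA grid bs from rfl,
      applyOps_append]
    congr 1
    exact foldl_guard_eq (fun d => pvGuardA grid (b.1 + d.1) (b.2 + d.2))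
      (fun d => (b.1 + d.1, b.2 + d.2)) [((0:Int),(1:Int)), (0,-1), (1,0), (-1,0)] (pvUpd g b.1 b.2)

lemma A_eq_applyOps (grid : List (List String)) (bombs : List (Int × Int)) :
    explode_bombs grid bombs = applyOps grid (pvOpsA grid bombs) :=
  A_fold grid bombs grid

lemma B_fold (grid : List (List String)) (bombSet : PySem.Set (Int × Int)) :
    ∀ (rs : List Nat) (g : List (List String)),
    rs.foldl (fun ng r =>
      let row := grid.getD r []
      (List.range row.length).foldl (fun ng2 c =>
        if pvGuardB bombSet row r c then pvUpd ng2 (r:Int) (c:Int) else ng2) ng) g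
      = applyOps g (rs.flatMap (fun r =>
          (List.range (grid.getD r []).length).filterMap (fun c =>
            if pvGuardB bombSet (grid.getD r []) r c then some ((r:Int), (c:Int)) else none))) := by
  intro rs
  induction rs with
  | nil => intro g; rfl
  | cons r rs ih =>
    intro g
    rw [List.foldl_cons, ih, List.flatMap_cons, applyOps_append]
    congr 1
    exact foldl_guard_eq (fun c => pvGuardB bombSet (grid.getD r []) r c)
      (fun c => ((r:Int), (c:Int))) (List.range (grid.getD r []).length) g

lemma B_eq_applyOps (grid : List (List String)) (bombs : List (Int × Int)) :
    explode_bombs_alt grid bombs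
      = applyOps grid (bombs ++ pvGatherOps grid (PySem.Set.ofList bombs)) := by
  rw [applyOps_append]
  exact B_fold grid (PySem.Set.ofList bombs) (List.range grid.length) (applyOps grid bombs)


lemma wrapIdx_natCast (n k : Nat) : wrapIdx n (k : Int) = k := by
  simp [wrapIdx]

lemma wrap_eq_cast (n : Nat) (i : Int) (h0 : 0 ≤ i) (r : Nat) (h : wrapIdx n i = r) :
    i = (r : Int) := by
  simp only [wrapIdx, h0, if_pos] at h
  omega

lemma pyGetD_zero_headD (g : List (List String)) :
    PySem.List.pyGetD g 0 [] = g.headD [] := by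
  cases g <;> simp [PySem.List.pyGetD, PySem.List.pyGet?, PySem.List.pyIdx?]

lemma guardA_iff (grid : List (List String)) (ni nj : Int) :
    pvGuardA grid ni nj = true ↔
      (0 ≤ ni ∧ ni < (grid.length : Int) ∧ 0 ≤ nj ∧
       nj < ((PySem.List.pyGetD grid 0 []).length : Int) ∧
       PySem.List.pyGetD (PySem.List.pyGetD grid ni []) nj "" ≠ "0") := by
  simp [pvGuardA, and_assoc]

lemma guardB_iff (bombs : List (Int × Int)) (row : List String) (r c : Nat) :
    pvGuardB (PySem.Set.ofList bombs) row r c = true ↔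
      (row.getD c "" ≠ "0" ∧
        (((r:Int)+1, (c:Int)) ∈ bombs ∨ ((r:Int)-1, (c:Int)) ∈ bombs ∨
         ((r:Int), (c:Int)+1) ∈ bombs ∨ ((r:Int), (c:Int)-1) ∈ bombs)) := by
  simp [pvGuardB, PySem.Set.mem_ofList, or_assoc]

lemma ops_iff (grid : List (List String)) (bombs : List (Int × Int))
    (hR : ∀ row ∈ grid, row.length = (grid.headD []).length)
    (r c : Nat) (hr : r < grid.length) (hc : c < (grid.headD []).length) :
    (∃ p ∈ pvOpsA grid bombs,
        wrapIdx grid.length p.1 = r ∧ wrapIdx (grid.headD []).length p.2 = c) ↔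
    (∃ p ∈ bombs ++ pvGatherOps grid (PySem.Set.ofList bombs),
        wrapIdx grid.length p.1 = r ∧ wrapIdx (grid.headD []).length p.2 = c) := by
  have hcols0 : (PySem.List.pyGetD grid 0 []).length = (grid.headD []).length := by
    rw [pyGetD_zero_headD]
  have hrowlen : (grid.getD r []).length = (grid.headD []).length :=
    hR _ (getD_mem_of_lt grid r hr)
  constructor
  · rintro ⟨p, hp, hw1, hw2⟩
    simp only [pvOpsA, List.mem_flatMap, List.mem_cons] at hp
    obtain ⟨b, hb, hpb | hpn⟩ := hp
    · exact ⟨p, List.mem_append_left _ (by rw [hpb]; exact hb), hw1, hw2⟩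
    · simp only [pvNeighOps, List.mem_filterMap] at hpn
      obtain ⟨d, hd, hif⟩ := hpn
      cases hg : pvGuardA grid (b.1 + d.1) (b.2 + d.2) with
      | false => rw [hg] at hif; simp at hif
      | true =>
        rw [hg] at hif
        simp only [if_pos] at hif
        obtain rfl : p = (b.1 + d.1, b.2 + d.2) := by
          cases hif; rfl
        obtain ⟨h1, h2, h3, h4, h5⟩ := (guardA_iff grid _ _).1 hg
        have hni : b.1 + d.1 = (r : Int) := wrap_eq_cast _ _ h1 r hw1
        have hnj : b.2 + d.2 = (c : Int) := wrap_eq_cast _ _ h3 c hw2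
        have hcell : (grid.getD r []).getD c "" ≠ "0" := by
          rw [hni, hnj] at h5
          simpa using h5
        refine ⟨((r:Int), (c:Int)), List.mem_append_right _ ?_,
          by simp [wrapIdx_natCast], by simp [wrapIdx_natCast]⟩
        simp only [pvGatherOps, List.mem_flatMap, List.mem_filterMap, List.mem_range]
        refine ⟨r, hr, c, by omega, ?_⟩
        have hgB : pvGuardB (PySem.Set.ofList bombs) (grid.getD r []) r c = true := by
          rw [guardB_iff]
          refine ⟨hcell, ?_⟩
          simp only [List.mem_cons, List.not_mem_nil, or_false] at hd
          rcases hd with rfl | rfl | rfl | rfl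
          · right; right; right
            have : ((r:Int), (c:Int)-1) = b := by
              obtain ⟨b1, b2⟩ := b
              simp_all
              omega
            rw [this]; exact hb
          · right; right; left
            have : ((r:Int), (c:Int)+1) = b := by
              obtain ⟨b1, b2⟩ := b
              simp_all
              omega
            rw [this]; exact hb
          · right; left
            have : ((r:Int)-1, (c:Int)) = b := by
              obtain ⟨b1, b2⟩ := b
              simp_all
              omega
            rw [this]; exact hb
          · left
            have : ((r:Int)+1, (c:Int)) = b := by
              obtain ⟨b1, b2⟩ := b
              simp_all
              omega
            rw [this]; exact hb
        rw [if_pos hgB]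
  · rintro ⟨p, hp, hw1, hw2⟩
    rcases List.mem_append.1 hp with hpb | hpg
    · refine ⟨p, ?_, hw1, hw2⟩
      simp only [pvOpsA, List.mem_flatMap, List.mem_cons]
      exact ⟨p, hpb, Or.inl rfl⟩
    · simp only [pvGatherOps, List.mem_flatMap, List.mem_filterMap, List.mem_range] at hpg
      obtain ⟨r', hr', c', hc', hif⟩ := hpg
      cases hg : pvGuardB (PySem.Set.ofList bombs) (grid.getD r' []) r' c' with
      | false => rw [hg] at hif; simp at hif
      | true =>
        rw [hg] at hif
        simp only [if_pos] at hif
        obtain rfl : p = ((r':Int), (c':Int)) := by cases hif; rfl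
        rw [wrapIdx_natCast] at hw1 hw2
        subst hw1; subst hw2
        obtain ⟨hcell, hmem⟩ := (guardB_iff bombs _ r' c').1 hg
        have hclt : (c' : Int) < ((PySem.List.pyGetD grid 0 []).length : Int) := by
          rw [hcols0]; exact_mod_cast hc
      -- helper applications per direction
        have mk : ∀ (b : Int × Int) (d : Int × Int), b ∈ bombs →
            d ∈ [((0:Int),(1:Int)), (0,-1), (1,0), (-1,0)] →
            b.1 + d.1 = (r':Int) → b.2 + d.2 = (c':Int) →
            (∃ p ∈ pvOpsA grid bombs,
              wrapIdx grid.length p.1 = r' ∧ wrapIdx (grid.headD []).length p.2 = c') := by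
          intro b d hb hd hbr hbc
          refine ⟨((r':Int), (c':Int)), ?_, by simp [wrapIdx_natCast], by simp [wrapIdx_natCast]⟩
          simp only [pvOpsA, List.mem_flatMap, List.mem_cons]
          refine ⟨b, hb, Or.inr ?_⟩
          simp only [pvNeighOps, List.mem_filterMap]
          refine ⟨d, hd, ?_⟩
          have hgA : pvGuardA grid (b.1 + d.1) (b.2 + d.2) = true := by
            rw [guardA_iff]
            refine ⟨by omega, ?_, by omega, ?_, ?_⟩
            · rw [hbr]; exact_mod_cast hr
            · rw [hbc, hcols0]; exact_mod_cast hc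
            · rw [hbr, hbc]
              simpa using hcell
          rw [if_pos hgA, hbr, hbc]
        rcases hmem with hm | hm | hm | hm
        · exact mk _ ((-1:Int), (0:Int)) hm (by simp) (by omega) (by omega)
        · exact mk _ ((1:Int), (0:Int)) hm (by simp) (by omega) (by omega)
        · exact mk _ ((0:Int), (-1:Int)) hm (by simp) (by omega) (by omega)
        · exact mk _ ((0:Int), (1:Int)) hm (by simp) (by omega) (by omega)

lemma alt_nil (grid : List (List String)) : explode_bombs_alt grid [] = grid := by
  rw [B_eq_applyOps]
  have h : pvGatherOps grid (PySem.Set.ofList []) = [] := by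
    simp [pvGatherOps, pvGuardB, PySem.Set.contains, PySem.Set.ofList]
  rw [h]
  rfl

lemma cellAt_getElem (g : List (List String)) (i k : Nat) (h1 : i < g.length)
    (h2 : k < g[i].length) : g[i][k] = cellAt g i k := by
  simp [cellAt, List.getD_eq_getElem?_getD, List.getElem?_eq_getElem, h1, h2]

-- ===== VERDICT (by name: the statement is the Claim_ definition above) =====
theorem explode_bombs_spec : Claim_equal_explode_bombs := by
  unfold Claim_equal_explode_bombs
  intro grid bombs _ hPre
  rcases hPre with rfl | ⟨hR, hB⟩
  · unfold Spec_explode_bombs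
    rw [alt_nil]
    rfl
  unfold Spec_explode_bombs
  rw [A_eq_applyOps, B_eq_applyOps]
  have hSg : Shaped grid.length (grid.headD []).length grid := ⟨rfl, hR⟩
  have hcols0 : (PySem.List.pyGetD grid 0 []).length = (grid.headD []).length := by
    rw [pyGetD_zero_headD]
  have hAops : ∀ p ∈ pvOpsA grid bombs,
      InRangeP grid.length p.1 ∧ InRangeP (grid.headD []).length p.2 := by
    intro p hp
    simp only [pvOpsA, List.mem_flatMap, List.mem_cons] at hp
    obtain ⟨b, hb, hpb | hpn⟩ := hp
    · have := hB b hb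
      rw [hpb]
      exact ⟨⟨this.1, this.2.1⟩, ⟨this.2.2.1, this.2.2.2⟩⟩
    · simp only [pvNeighOps, List.mem_filterMap] at hpn
      obtain ⟨d, _, hif⟩ := hpn
      cases hg : pvGuardA grid (b.1 + d.1) (b.2 + d.2) with
      | false => rw [hg] at hif; simp at hif
      | true =>
        rw [hg] at hif
        simp only [if_pos] at hif
        obtain rfl : p = (b.1 + d.1, b.2 + d.2) := by cases hif; rfl
        obtain ⟨h1, h2, h3, h4, _⟩ := (guardA_iff grid _ _).1 hg
        rw [hcols0] at h4
        exact ⟨⟨by omega, h2⟩, ⟨by omega, h4⟩⟩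
  have hBops : ∀ p ∈ bombs ++ pvGatherOps grid (PySem.Set.ofList bombs),
      InRangeP grid.length p.1 ∧ InRangeP (grid.headD []).length p.2 := by
    intro p hp
    rcases List.mem_append.1 hp with hpb | hpg
    · have := hB p hpb
      exact ⟨⟨this.1, this.2.1⟩, ⟨this.2.2.1, this.2.2.2⟩⟩
    · simp only [pvGatherOps, List.mem_flatMap, List.mem_filterMap, List.mem_range] at hpg
      obtain ⟨r', hr', c', hc', hif⟩ := hpg
      cases hg : pvGuardB (PySem.Set.ofList bombs) (grid.getD r' []) r' c' with
      | false => rw [hg] at hif; simp at hif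
      | true =>
        rw [hg] at hif
        simp only [if_pos] at hif
        obtain rfl : p = ((r':Int), (c':Int)) := by cases hif; rfl
        have hrowlen : (grid.getD r' []).length = (grid.headD []).length :=
          hR _ (getD_mem_of_lt grid r' hr')
        rw [hrowlen] at hc'
        refine ⟨⟨?_, ?_⟩, ⟨?_, ?_⟩⟩
        · show -(grid.length : Int) ≤ (r' : Int); omega
        · show (r' : Int) < (grid.length : Int); omega
        · show -(((grid.headD []).length : Int)) ≤ (c' : Int); omega
        · show (c' : Int) < ((grid.headD []).length : Int); omega
  have hShA := applyOps_shape grid.length (grid.headD []).length (pvOpsA grid bombs) grid hSg hAops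
  have hShB := applyOps_shape grid.length (grid.headD []).length _ grid hSg hBops
  have hcell : ∀ r c : Nat, r < grid.length → c < (grid.headD []).length →
      cellAt (applyOps grid (pvOpsA grid bombs)) r c =
      cellAt (applyOps grid (bombs ++ pvGatherOps grid (PySem.Set.ofList bombs))) r c := by
    intro r c hr hc
    rw [applyOps_cell grid.length (grid.headD []).length _ grid hSg hAops r c,
        applyOps_cell grid.length (grid.headD []).length _ grid hSg hBops r c]
    by_cases h : ∃ p ∈ pvOpsA grid bombs,
        wrapIdx grid.length p.1 = r ∧ wrapIdx (grid.headD []).length p.2 = c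
    · rw [if_pos h, if_pos ((ops_iff grid bombs hR r c hr hc).1 h)]
    · rw [if_neg h, if_neg (fun h2 => h ((ops_iff grid bombs hR r c hr hc).2 h2))]
  apply List.ext_getElem (by rw [hShA.1, hShB.1])
  intro i h1 h2
  have hiA : i < grid.length := by rw [← hShA.1]; exact h1
  have hrowA : (applyOps grid (pvOpsA grid bombs))[i].length = (grid.headD []).length :=
    hShA.2 _ (List.getElem_mem h1)
  have hrowB : (applyOps grid (bombs ++ pvGatherOps grid (PySem.Set.ofList bombs)))[i].length
      = (grid.headD []).length := hShB.2 _ (List.getElem_mem h2)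
  apply List.ext_getElem (by rw [hrowA, hrowB])
  intro k hk1 hk2
  have hkc : k < (grid.headD []).length := by rw [← hrowA]; exact hk1
  rw [cellAt_getElem _ _ _ h1 hk1, cellAt_getElem _ _ _ h2 hk2]
  exact hcell i k hiA hkc
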